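-- pv_equiv track=rewrite | github.com/zxddev/emergency-agents-langgraph | src/emergency_agents/planner/_archived/recon_task_generator.py | match_task_type
-- ===== SOURCE A (Python) =====
-- from typing import List, Dict, Any, TypedDict, Optional, FrozenSet
--
-- CAPABILITY_TO_TASK_TYPE: Dict[FrozenSet[str], str] = {
--     frozenset(["mapping", "aerial_recon"]): "扫图建模",
--     frozenset(["thermal_imaging", "aerial_recon"]): "人员搜索",
--     frozenset(["gas_detection", "aerial_recon"]): "环境检测",
--     frozenset(["aerial_recon"]): "宏观侦察",
--     frozenset(["close_inspection"]): "近距离检查",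
--     frozenset(["hazmat_detection", "close_inspection"]): "危险物质检测",
--     frozenset(["water_recon"]): "航道识别",
--     frozenset(["water_recon", "thermal_imaging"]): "水域搜救",
--     frozenset(["rescue_support", "water_recon"]): "救援支持",
-- }
--
-- DEFAULT_TASK_TYPE_BY_ENV: Dict[str, str] = {
--     "air": "空中侦察",
--     "land": "地面巡逻",
--     "sea": "水域巡查",
-- }
--
-- def match_task_type(capabilities: List[str], env_type: str) -> str:
--     """
--     根据设备能力匹配任务类型
--
--     匹配策略：
--     1. 尝试精确匹配能力组合
--     2. 尝试子集匹配（包含某些能力即可）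
--     3. 使用默认任务类型
--
--     参数：
--         capabilities: 设备能力列表
--         env_type: 环境类型（air/land/sea）
--
--     返回：
--         任务类型字符串
--     """
--     if not capabilities:
--         return DEFAULT_TASK_TYPE_BY_ENV.get(env_type, "通用侦察")
--
--     cap_set = frozenset(capabilities)
--
--     # 精确匹配
--     if cap_set in CAPABILITY_TO_TASK_TYPE:
--         return CAPABILITY_TO_TASK_TYPE[cap_set]
--
--     # 子集匹配（找到最佳匹配）
--     best_match_score = 0
--     best_task_type = None
--
--     for cap_pattern, task_type in CAPABILITY_TO_TASK_TYPE.items():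
--         if cap_pattern.issubset(cap_set):
--             match_score = len(cap_pattern)
--             if match_score > best_match_score:
--                 best_match_score = match_score
--                 best_task_type = task_type
--
--     if best_task_type:
--         return best_task_type
--
--     # 默认任务类型
--     return DEFAULT_TASK_TYPE_BY_ENV.get(env_type, "通用侦察")
-- ===== SOURCE B (Python) =====
-- from typing import List, Dict, FrozenSet
--
-- CAPABILITY_TO_TASK_TYPE: Dict[FrozenSet[str], str] = {
--     frozenset(["mapping", "aerial_recon"]): "扫图建模",
--     frozenset(["thermal_imaging", "aerial_recon"]): "人员搜索",
--     frozenset(["gas_detection", "aerial_recon"]): "环境检测",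
--     frozenset(["aerial_recon"]): "宏观侦察",
--     frozenset(["close_inspection"]): "近距离检查",
--     frozenset(["hazmat_detection", "close_inspection"]): "危险物质检测",
--     frozenset(["water_recon"]): "航道识别",
--     frozenset(["water_recon", "thermal_imaging"]): "水域搜救",
--     frozenset(["rescue_support", "water_recon"]): "救援支持",
-- }
--
-- DEFAULT_TASK_TYPE_BY_ENV: Dict[str, str] = {
--     "air": "空中侦察",
--     "land": "地面巡逻",
--     "sea": "水域巡查",
-- }
--
-- # Most specific patterns first; the stable sort keeps dict order among equal lengths.
-- _PATTERNS_BY_SPECIFICITY = sorted(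
--     CAPABILITY_TO_TASK_TYPE.items(), key=lambda kv: -len(kv[0])
-- )
--
-- def match_task_type(capabilities: List[str], env_type: str) -> str:
--     if not capabilities:
--         return DEFAULT_TASK_TYPE_BY_ENV.get(env_type, "通用侦察")
--     cap_set = frozenset(capabilities)
--     for pattern, task_type in _PATTERNS_BY_SPECIFICITY:
--         if pattern.issubset(cap_set):
--             return task_type
--     return DEFAULT_TASK_TYPE_BY_ENV.get(env_type, "通用侦察")
-- ===== Notes on version B (the rewrite author's own statement) =====
-- stated objective: simpler
-- what changed: Replaces A's exact-match dict lookup plus best-score tracking loop with a single first-match scan over the patterns pre-sorted stably by descending size (the exact match is the unique maximal subset, so it is found first).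
import Mathlib
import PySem

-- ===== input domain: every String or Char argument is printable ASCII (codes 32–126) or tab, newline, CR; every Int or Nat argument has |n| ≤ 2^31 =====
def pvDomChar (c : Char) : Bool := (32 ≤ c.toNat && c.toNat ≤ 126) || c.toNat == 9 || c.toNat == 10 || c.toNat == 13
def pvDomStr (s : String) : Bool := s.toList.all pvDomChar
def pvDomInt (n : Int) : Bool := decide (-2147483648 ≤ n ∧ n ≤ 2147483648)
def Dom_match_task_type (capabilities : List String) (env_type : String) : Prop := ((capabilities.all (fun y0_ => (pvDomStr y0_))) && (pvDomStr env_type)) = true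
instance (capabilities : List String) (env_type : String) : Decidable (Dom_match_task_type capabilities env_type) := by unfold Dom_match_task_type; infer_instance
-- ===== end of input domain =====

-- B replaces A's exact-lookup + best-score fold by one first-match scan of the
-- patterns pre-sorted (stably) by descending size; objective: simpler.

-- ===== PORT A =====
-- module constant CAPABILITY_TO_TASK_TYPE: a dict with frozenset keys, in insertion order
def capTable : List (PySem.Set String × String) :=
  [ (PySem.Set.ofList ["mapping", "aerial_recon"], "扫图建模"),
    (PySem.Set.ofList ["thermal_imaging", "aerial_recon"], "人员搜索"),
    (PySem.Set.ofList ["gas_detection", "aerial_recon"], "环境检测"),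
    (PySem.Set.ofList ["aerial_recon"], "宏观侦察"),
    (PySem.Set.ofList ["close_inspection"], "近距离检查"),
    (PySem.Set.ofList ["hazmat_detection", "close_inspection"], "危险物质检测"),
    (PySem.Set.ofList ["water_recon"], "航道识别"),
    (PySem.Set.ofList ["water_recon", "thermal_imaging"], "水域搜救"),
    (PySem.Set.ofList ["rescue_support", "water_recon"], "救援支持") ]

-- module constant DEFAULT_TASK_TYPE_BY_ENV
def defaultByEnv : PySem.Dict String String :=
  PySem.Dict.ofList [("air", "空中侦察"), ("land", "地面巡逻"), ("sea", "水域巡查")]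

-- 'cap_set in CAPABILITY_TO_TASK_TYPE' + 'CAPABILITY_TO_TASK_TYPE[cap_set]': dict lookup
-- with frozenset keys compares keys as SETS (hash equality); exact: first (unique) set-equal key.
def findExact (capSet : PySem.Set String) : List (PySem.Set String × String) → Option String
  | [] => none
  | (p, t) :: rest => if PySem.Set.equal capSet p then some t else findExact capSet rest

-- A's subset-match loop: best (score, task_type) so far, strict improvement only
def subsetBest (capSet : PySem.Set String) : Nat × Option String :=
  capTable.foldl
    (fun acc pt =>
      if PySem.Set.issubset pt.1 capSet then
        if pt.1.length > acc.1 then (pt.1.length, some pt.2) else acc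
      else acc)
    (0, none)

def match_task_type (capabilities : List String) (env_type : String) : String :=
  if capabilities = [] then PySem.Dict.getD defaultByEnv env_type "通用侦察"
  else
    let capSet := PySem.Set.ofList capabilities
    match findExact capSet capTable with
    | some t => t
    | none =>
      match (subsetBest capSet).2 with
      | some t => t
      | none => PySem.Dict.getD defaultByEnv env_type "通用侦察"

-- ===== PORT B =====
-- module constant _PATTERNS_BY_SPECIFICITY = sorted(items, key=lambda kv: -len(kv[0]))
def sortedPatterns : List (PySem.Set String × String) :=
  PySem.List.sorted capTable (fun kv => -(kv.1.length : Int)) false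

-- B's for-loop: return the task_type of the first pattern that is a subset of cap_set
def firstSubset (capSet : PySem.Set String) : List (PySem.Set String × String) → Option String
  | [] => none
  | (p, t) :: rest => if PySem.Set.issubset p capSet then some t else firstSubset capSet rest

def match_task_type_alt (capabilities : List String) (env_type : String) : String :=
  if capabilities = [] then PySem.Dict.getD defaultByEnv env_type "通用侦察"
  else
    let capSet := PySem.Set.ofList capabilities
    match firstSubset capSet sortedPatterns with
    | some t => t
    | none => PySem.Dict.getD defaultByEnv env_type "通用侦察"

-- ===== PRECONDITION & SPEC =====
def Spec_match_task_type (capabilities : List String) (env_type : String) (out : String) : Prop := out = match_task_type_alt capabilities env_type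
instance (capabilities : List String) (env_type : String) (out : String) : Decidable (Spec_match_task_type capabilities env_type out) := by unfold Spec_match_task_type; infer_instance

-- ===== CLAIM (what is proved, stated in full; the proofs are below) =====
def Claim_equal_match_task_type : Prop := ∀ (capabilities : List String) (env_type : String), Dom_match_task_type capabilities env_type → Spec_match_task_type capabilities env_type (match_task_type capabilities env_type)

-- ===== LEMMAS AND PROOFS =====

-- A's fold / B's scan as functions of the nine subset-test booleans (c1..c9 in
-- capTable order; pickB receives them in sortedPatterns order)
def pickA (cs : List (Bool × Nat × String)) : Option String :=
  (cs.foldl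
    (fun acc ct =>
      if ct.1 then
        if ct.2.1 > acc.1 then (ct.2.1, some ct.2.2) else acc
      else acc)
    (0, none)).2

def pickB : List (Bool × String) → Option String
  | [] => none
  | c :: rest => if c.1 then some c.2 else pickB rest

theorem pick_eq (c1 c2 c3 c4 c5 c6 c7 c8 c9 : Bool) :
    pickA [(c1, 2, "扫图建模"), (c2, 2, "人员搜索"), (c3, 2, "环境检测"),
           (c4, 1, "宏观侦察"), (c5, 1, "近距离检查"), (c6, 2, "危险物质检测"),
           (c7, 1, "航道识别"), (c8, 2, "水域搜救"), (c9, 2, "救援支持")]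
      = pickB [(c1, "扫图建模"), (c2, "人员搜索"), (c3, "环境检测"),
               (c6, "危险物质检测"), (c8, "水域搜救"), (c9, "救援支持"),
               (c4, "宏观侦察"), (c5, "近距离检查"), (c7, "航道识别")] := by
  revert c1 c2 c3 c4 c5 c6 c7 c8 c9; decide

set_option maxHeartbeats 2000000 in
theorem sortedPatterns_eq :
    sortedPatterns =
      [ (PySem.Set.ofList ["mapping", "aerial_recon"], "扫图建模"),
        (PySem.Set.ofList ["thermal_imaging", "aerial_recon"], "人员搜索"),
        (PySem.Set.ofList ["gas_detection", "aerial_recon"], "环境检测"),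
        (PySem.Set.ofList ["hazmat_detection", "close_inspection"], "危险物质检测"),
        (PySem.Set.ofList ["water_recon", "thermal_imaging"], "水域搜救"),
        (PySem.Set.ofList ["rescue_support", "water_recon"], "救援支持"),
        (PySem.Set.ofList ["aerial_recon"], "宏观侦察"),
        (PySem.Set.ofList ["close_inspection"], "近距离检查"),
        (PySem.Set.ofList ["water_recon"], "航道识别") ] := by
  rfl

set_option maxHeartbeats 4000000 in
theorem loop_eq_scan (c : PySem.Set String) :
    (subsetBest c).2 = firstSubset c sortedPatterns := by
  rw [sortedPatterns_eq]
  exact pick_eq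
    (PySem.Set.issubset (PySem.Set.ofList ["mapping", "aerial_recon"]) c)
    (PySem.Set.issubset (PySem.Set.ofList ["thermal_imaging", "aerial_recon"]) c)
    (PySem.Set.issubset (PySem.Set.ofList ["gas_detection", "aerial_recon"]) c)
    (PySem.Set.issubset (PySem.Set.ofList ["aerial_recon"]) c)
    (PySem.Set.issubset (PySem.Set.ofList ["close_inspection"]) c)
    (PySem.Set.issubset (PySem.Set.ofList ["hazmat_detection", "close_inspection"]) c)
    (PySem.Set.issubset (PySem.Set.ofList ["water_recon"]) c)
    (PySem.Set.issubset (PySem.Set.ofList ["water_recon", "thermal_imaging"]) c)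
    (PySem.Set.issubset (PySem.Set.ofList ["rescue_support", "water_recon"]) c)

theorem issubset_of_equal {s t : PySem.Set String} (h : PySem.Set.equal s t = true)
    (q : PySem.Set String) : PySem.Set.issubset q s = PySem.Set.issubset q t := by
  have hm := (PySem.Set.equal_iff s t).mp h
  have fwd : PySem.Set.issubset q s = true → PySem.Set.issubset q t = true := by
    intro hq
    rw [PySem.Set.issubset_iff]
    exact fun x hx => (hm x).mp ((PySem.Set.issubset_iff q s).mp hq x hx)
  have bwd : PySem.Set.issubset q t = true → PySem.Set.issubset q s = true := by
    intro hq
    rw [PySem.Set.issubset_iff]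
    exact fun x hx => (hm x).mpr ((PySem.Set.issubset_iff q t).mp hq x hx)
  cases hqs : PySem.Set.issubset q s <;> cases hqt : PySem.Set.issubset q t <;>
    simp_all

theorem firstSubset_congr {s t : PySem.Set String}
    (h : ∀ q, PySem.Set.issubset q s = PySem.Set.issubset q t)
    (l : List (PySem.Set String × String)) :
    firstSubset s l = firstSubset t l := by
  induction l with
  | nil => rfl
  | cons hd tl ih => simp only [firstSubset, h hd.1, ih]

theorem exact_scan (c : PySem.Set String) (t : String)
    (hx : findExact c capTable = some t) :
    firstSubset c sortedPatterns = some t := by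
  simp only [capTable, findExact] at hx
  split_ifs at hx with h1 h2 h3 h4 h5 h6 h7 h8 h9 <;>
    first
    | (injection hx with hx; subst hx;
       first
       | (rw [firstSubset_congr (issubset_of_equal h1) sortedPatterns]; decide)
       | (rw [firstSubset_congr (issubset_of_equal h2) sortedPatterns]; decide)
       | (rw [firstSubset_congr (issubset_of_equal h3) sortedPatterns]; decide)
       | (rw [firstSubset_congr (issubset_of_equal h4) sortedPatterns]; decide)
       | (rw [firstSubset_congr (issubset_of_equal h5) sortedPatterns]; decide)
       | (rw [firstSubset_congr (issubset_of_equal h6) sortedPatterns]; decide)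
       | (rw [firstSubset_congr (issubset_of_equal h7) sortedPatterns]; decide)
       | (rw [firstSubset_congr (issubset_of_equal h8) sortedPatterns]; decide)
       | (rw [firstSubset_congr (issubset_of_equal h9) sortedPatterns]; decide))

-- ===== VERDICT (by name: the statement is the Claim_ definition above) =====
theorem match_task_type_spec : Claim_equal_match_task_type := by
  unfold Claim_equal_match_task_type Spec_match_task_type
  intro caps env _
  unfold match_task_type match_task_type_alt
  by_cases hc : caps = []
  · simp [hc]
  · simp only [if_neg hc]
    cases hx : findExact (PySem.Set.ofList caps) capTable with
    | some t => rw [exact_scan _ t hx]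
    | none => rw [loop_eq_scan]
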